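-- pv_equiv track=rewrite | github.com/benkha/RRN-Weather | code/rnn_python/Information.py | giveClippedAndDelayed
-- ===== SOURCE A (Python) =====
-- def giveClippedAndDelayed(data):
--     numberOfNodes = len(data[0][0])
--     data2 = []
--     a = 0
--     while a < numberOfNodes:
--         fullClipped = []
--         fullDelayed = []
--         b = 0
--         while b < len(data):
--             c = 0
--             while c < (len(data[b]) - 1):
--                 fullClipped.append(data[b][c][a])
--                 fullDelayed.append(data[b][c+1][a])
--                 c += 1
--             b += 1
--         data2.append([fullClipped, fullDelayed])
--         a += 1
--     return data2
-- ===== SOURCE B (Python) =====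
-- def giveClippedAndDelayed(data):
--     numberOfNodes = len(data[0][0])
--     clipped = [row for seq in data for row in seq[:-1]]
--     delayed = [row for seq in data for row in seq[1:]]
--     return [[[row[a] for row in clipped], [row[a] for row in delayed]]
--             for a in range(numberOfNodes)]
-- ===== Notes on version B (the rewrite author's own statement) =====
-- stated objective: faster
-- what changed: B flattens the data once into a clipped list and a delayed list (seq[:-1] / seq[1:]) and then extracts the per-node columns with comprehensions, instead of re-scanning the whole nested structure once per node with hand-rolled while loops and integer counters.
import Mathlib
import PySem

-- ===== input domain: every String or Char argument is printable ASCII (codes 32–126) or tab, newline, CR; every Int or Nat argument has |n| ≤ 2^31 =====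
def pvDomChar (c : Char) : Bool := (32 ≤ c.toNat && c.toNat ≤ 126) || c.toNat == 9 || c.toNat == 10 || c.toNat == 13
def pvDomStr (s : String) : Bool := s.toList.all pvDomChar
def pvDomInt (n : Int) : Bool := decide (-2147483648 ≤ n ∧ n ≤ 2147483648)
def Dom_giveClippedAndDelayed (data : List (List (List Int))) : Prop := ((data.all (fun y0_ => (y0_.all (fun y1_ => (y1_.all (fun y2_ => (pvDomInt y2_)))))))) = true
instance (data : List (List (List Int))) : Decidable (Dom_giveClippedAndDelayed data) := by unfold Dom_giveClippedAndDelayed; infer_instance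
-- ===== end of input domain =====

-- B flattens the data once into clipped/delayed row lists and then extracts per-node
-- columns, instead of re-scanning the nested structure once per node (alternative decomposition).


-- ===== PORT A =====
-- Literal transliteration of A: three nested while loops become foldl over List.range;
-- data[b][c][a] indexing (always in range on Pre_) is ported with getD.
def giveClippedAndDelayed (data : List (List (List Int))) : List (List (List Int)) :=
  let numberOfNodes := ((data.headD []).headD []).length
  (List.range numberOfNodes).foldl (fun data2 a =>
    let p := data.foldl (fun (p : List Int × List Int) seq =>
        (List.range (seq.length - 1)).foldl (fun (q : List Int × List Int) c =>
          (q.1 ++ [(seq.getD c []).getD a 0], q.2 ++ [(seq.getD (c+1) []).getD a 0])) p)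
      ([], [])
    data2 ++ [[p.1, p.2]]) []

-- ===== PORT B =====
-- Transliteration of Source B: seq[:-1] = dropLast, seq[1:] = drop 1, list comprehensions = map/flatMap.
def giveClippedAndDelayed_alt (data : List (List (List Int))) : List (List (List Int)) :=
  let numberOfNodes := ((data.headD []).headD []).length
  let clipped := data.flatMap (fun seq => seq.dropLast)
  let delayed := data.flatMap (fun seq => seq.drop 1)
  (List.range numberOfNodes).map (fun a =>
    [clipped.map (fun row => row.getD a 0), delayed.map (fun row => row.getD a 0)])

-- ===== PRECONDITION & SPEC =====
-- Pre_ excludes exactly the inputs where Python A raises IndexError: empty data,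
-- empty data[0], or a row shorter than numberOfNodes inside a sequence of length ≥ 2.
def Pre_giveClippedAndDelayed (data : List (List (List Int))) : Prop :=
  data ≠ [] ∧ data.headD [] ≠ [] ∧
  ∀ seq ∈ data, 2 ≤ seq.length →
    ∀ row ∈ seq, ((data.headD []).headD []).length ≤ row.length
instance (data : List (List (List Int))) : Decidable (Pre_giveClippedAndDelayed data) := by
  unfold Pre_giveClippedAndDelayed; infer_instance
def pvWitness_giveClippedAndDelayed : List (List (List Int)) := [[[1, 2], [3, 4], [5, 6]]]
def Spec_giveClippedAndDelayed (data : List (List (List Int))) (out : List (List (List Int))) : Prop := out = giveClippedAndDelayed_alt data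
instance (data : List (List (List Int))) (out : List (List (List Int))) : Decidable (Spec_giveClippedAndDelayed data out) := by unfold Spec_giveClippedAndDelayed; infer_instance

-- ===== CLAIM (what is proved, stated in full; the proofs are below) =====
def Claim_equal_giveClippedAndDelayed : Prop := ∀ (data : List (List (List Int))), Dom_giveClippedAndDelayed data → Pre_giveClippedAndDelayed data → Spec_giveClippedAndDelayed data (giveClippedAndDelayed data)

-- ===== LEMMAS AND PROOFS =====

-- a fold that appends one element per step is a map
theorem pvFoldAppend {α β : Type} (f : α → β) (l : List α) (acc : List β) :
    l.foldl (fun acc x => acc ++ [f x]) acc = acc ++ l.map f := by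
  induction l generalizing acc with
  | nil => simp
  | cons x xs ih => simp [List.foldl_cons, ih]

-- a fold appending to both components of a pair is a pair of flatMaps
theorem pvPairFold {α : Type} (f g : α → List Int) (l : List α) (x y : List Int) :
    l.foldl (fun (p : List Int × List Int) s => (p.1 ++ f s, p.2 ++ g s)) (x, y)
      = (x ++ l.flatMap f, y ++ l.flatMap g) := by
  induction l generalizing x y with
  | nil => simp
  | cons s ss ih => simp [List.foldl_cons, ih]

theorem pvRangeGetD (l : List (List Int)) (a : Nat) :
    (List.range (l.length - 1)).map (fun c => (l.getD c []).getD a 0)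
      = l.dropLast.map (fun row => row.getD a 0) := by
  apply List.ext_getElem
  · simp
  · intro i h1 h2
    have hi : i < l.length - 1 := by simpa using h1
    have hil : i < l.length := lt_of_lt_of_le hi (Nat.sub_le _ _)
    simp [List.getD_eq_getElem?_getD, List.getElem?_eq_getElem hil,
      List.getElem_dropLast]

theorem pvRangeGetDSucc (l : List (List Int)) (a : Nat) :
    (List.range (l.length - 1)).map (fun c => (l.getD (c+1) []).getD a 0)
      = (l.drop 1).map (fun row => row.getD a 0) := by
  apply List.ext_getElem
  · simp
  · intro i h1 h2
    have hi : i < l.length - 1 := by simpa using h1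
    have hil : i + 1 < l.length := by omega
    simp [List.getD_eq_getElem?_getD, List.getElem?_eq_getElem hil]

theorem pvFlatMapSingleton {α β : Type} (f : α → β) (l : List α) :
    l.flatMap (fun x => [f x]) = l.map f := by
  induction l with
  | nil => rfl
  | cons x xs ih => simp [List.flatMap_cons, ih]

-- the innermost while loop of A, as one sequence's contribution
theorem pvSeqFold (seq : List (List Int)) (a : Nat) (q : List Int × List Int) :
    (List.range (seq.length - 1)).foldl (fun (q : List Int × List Int) c =>
        (q.1 ++ [(seq.getD c []).getD a 0], q.2 ++ [(seq.getD (c+1) []).getD a 0])) q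
      = (q.1 ++ seq.dropLast.map (fun row => row.getD a 0),
         q.2 ++ (seq.drop 1).map (fun row => row.getD a 0)) := by
  have h := pvPairFold (fun c => [(seq.getD c []).getD a 0])
    (fun c => [(seq.getD (c+1) []).getD a 0]) (List.range (seq.length - 1)) q.1 q.2
  simp only [pvFlatMapSingleton] at h
  rw [← Prod.mk.eta (p := q), h, pvRangeGetD, pvRangeGetDSucc]

-- the middle while loop of A, over all sequences
theorem pvDataFold (data : List (List (List Int))) (a : Nat) (p : List Int × List Int) :
    data.foldl (fun (p : List Int × List Int) seq =>
        (List.range (seq.length - 1)).foldl (fun (q : List Int × List Int) c =>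
          (q.1 ++ [(seq.getD c []).getD a 0], q.2 ++ [(seq.getD (c+1) []).getD a 0])) p) p
      = (p.1 ++ (data.flatMap (fun seq => seq.dropLast)).map (fun row => row.getD a 0),
         p.2 ++ (data.flatMap (fun seq => seq.drop 1)).map (fun row => row.getD a 0)) := by
  induction data generalizing p with
  | nil => simp
  | cons seq rest ih =>
    simp only [List.foldl_cons]
    rw [pvSeqFold, ih]
    simp [List.map_append, List.append_assoc]

-- ===== VERDICT (by name: the statement is the Claim_ definition above) =====
theorem giveClippedAndDelayed_spec : Claim_equal_giveClippedAndDelayed := by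
  intro data _ _
  unfold Spec_giveClippedAndDelayed giveClippedAndDelayed giveClippedAndDelayed_alt
  rw [pvFoldAppend (fun a =>
      let p := data.foldl (fun (p : List Int × List Int) seq =>
        (List.range (seq.length - 1)).foldl (fun (q : List Int × List Int) c =>
          (q.1 ++ [(seq.getD c []).getD a 0], q.2 ++ [(seq.getD (c+1) []).getD a 0])) p)
        ([], [])
      [p.1, p.2])]
  simp only [List.nil_append, pvDataFold]
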